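-- pv_equiv track=rewrite | github.com/orenvlad-ai/wb-core | apps/seller_portal_feedbacks_complaints_scout.py | field_availability
-- ===== SOURCE A (Python) =====
-- from typing import Any, Iterable
--
-- def field_availability(rows: list[dict[str, Any]]) -> dict[str, bool]:
--     fields = [
--         "product_title",
--         "supplier_article",
--         "wb_article",
--         "nm_id",
--         "rating",
--         "review_date",
--         "review_datetime",
--         "text_snippet",
--         "pros_snippet",
--         "cons_snippet",
--         "comment_snippet",
--         "answer_status",
--         "purchase_status",
--         "media_indicators",
--         "hidden_feedback_id",
--         "row_menu_opened",
--         "complaint_action_found",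
--         "complaint_reason",
--         "complaint_description",
--         "review_text_snippet",
--         "displayed_status",
--         "decision_label",
--         "wb_response_snippet",
--     ]
--     return {field: any(bool(row.get(field)) for row in rows) for field in fields}
-- ===== SOURCE B (Python) =====
-- from typing import Any
--
-- _FIELDS = [
--     "product_title", "supplier_article", "wb_article", "nm_id", "rating",
--     "review_date", "review_datetime", "text_snippet", "pros_snippet",
--     "cons_snippet", "comment_snippet", "answer_status", "purchase_status",
--     "media_indicators", "hidden_feedback_id", "row_menu_opened",
--     "complaint_action_found", "complaint_reason", "complaint_description",
--     "review_text_snippet", "displayed_status", "decision_label",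
--     "wb_response_snippet",
-- ]
--
-- def field_availability(rows: list[dict[str, Any]]) -> dict[str, bool]:
--     # Build, in one scan of the rows' own items (no per-field lookups),
--     # the set of keys that are truthy somewhere; then answer by membership.
--     truthy_keys = set()
--     for row in rows:
--         for key, value in row.items():
--             if value:
--                 truthy_keys.add(key)
--     return {field: field in truthy_keys for field in _FIELDS}
-- ===== Notes on version B (the rewrite author's own statement) =====
-- stated objective: alternative
-- what changed: Instead of A's 23 per-field any()-scans that look each field up in every row, B never looks a field up in a row at all: it scans each row's own items once, collecting the set of keys with a truthy value, and then answers each field by a set-membership test.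
import Mathlib
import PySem

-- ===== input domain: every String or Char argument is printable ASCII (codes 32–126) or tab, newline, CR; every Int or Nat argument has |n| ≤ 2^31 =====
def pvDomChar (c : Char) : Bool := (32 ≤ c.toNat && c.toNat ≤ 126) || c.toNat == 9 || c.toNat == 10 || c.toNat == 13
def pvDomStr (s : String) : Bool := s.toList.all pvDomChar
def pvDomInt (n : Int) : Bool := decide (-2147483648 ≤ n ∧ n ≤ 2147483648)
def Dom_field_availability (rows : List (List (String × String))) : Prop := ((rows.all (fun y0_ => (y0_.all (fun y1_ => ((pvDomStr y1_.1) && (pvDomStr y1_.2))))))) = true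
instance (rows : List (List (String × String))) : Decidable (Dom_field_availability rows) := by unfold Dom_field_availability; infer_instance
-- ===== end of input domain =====

-- B drops A's 23 per-field lookups into every row: it scans the rows' own items once,
-- collecting the SET of keys that have a truthy value, and answers each field by set
-- membership (objective: alternative).

-- the fixed field list from the source
def pvFields : List String :=
  ["product_title", "supplier_article", "wb_article", "nm_id", "rating",
   "review_date", "review_datetime", "text_snippet", "pros_snippet",
   "cons_snippet", "comment_snippet", "answer_status", "purchase_status",
   "media_indicators", "hidden_feedback_id", "row_menu_opened",
   "complaint_action_found", "complaint_reason", "complaint_description",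
   "review_text_snippet", "displayed_status", "decision_label",
   "wb_response_snippet"]

-- bool(row.get(field)): missing key and "" are falsy
def pvTruthy (o : Option String) : Bool :=
  match o with
  | none => false
  | some s => s ≠ ""

-- row.get(field) on the dict row (association-list lookup, first match)
def pvRowGet (row : List (String × String)) (f : String) : Option String :=
  (PySem.Dict.mk row).get? f

-- ===== PORT A =====
-- {field: any(bool(row.get(field)) for row in rows) for field in fields}
def field_availability (rows : List (List (String × String))) : List (String × Bool) :=
  pvFields.map (fun field => (field, rows.any (fun row => pvTruthy (pvRowGet row field))))

-- ===== PORT B =====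
-- inner loop: 'for key, value in row.items(): if value: truthy_keys.add(key)'
def pvCollect (s : PySem.Set String) (row : List (String × String)) : PySem.Set String :=
  row.foldl (fun s kv => if kv.2 ≠ "" then PySem.Set.add s kv.1 else s) s

def field_availability_alt (rows : List (List (String × String))) : List (String × Bool) :=
  let truthyKeys : PySem.Set String := rows.foldl pvCollect PySem.Set.empty
  pvFields.map (fun field => (field, truthyKeys.contains field))

-- ===== PRECONDITION & SPEC =====
-- Pre_ restricts each row to distinct keys: a row stands for a Python dict, whose keys
-- are necessarily unique, so an association list with a duplicated key represents no
-- Python input at all (A's first-match lookup there is an artefact of the encoding).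
def Pre_field_availability (rows : List (List (String × String))) : Prop :=
  ∀ row ∈ rows, (row.map Prod.fst).Nodup
instance (rows : List (List (String × String))) : Decidable (Pre_field_availability rows) := by unfold Pre_field_availability; infer_instance

def pvWitness_field_availability : (List (List (String × String))) :=
  [[("rating", "5"), ("nm_id", "")], [("product_title", "x")]]

def Spec_field_availability (rows : List (List (String × String))) (out : List (String × Bool)) : Prop := out = field_availability_alt rows
instance (rows : List (List (String × String))) (out : List (String × Bool)) : Decidable (Spec_field_availability rows out) := by unfold Spec_field_availability; infer_instance

-- ===== CLAIM (what is proved, stated in full; the proofs are below) =====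
def Claim_equal_field_availability : Prop := ∀ (rows : List (List (String × String))), Dom_field_availability rows → Pre_field_availability rows → Spec_field_availability rows (field_availability rows)

-- ===== LEMMAS AND PROOFS =====
-- membership in the set collected from one row
theorem pvCollect_mem (row : List (String × String)) :
    ∀ s : PySem.Set String, ∀ f : String,
      f ∈ pvCollect s row ↔ f ∈ s ∨ ∃ kv ∈ row, kv.1 = f ∧ kv.2 ≠ "" := by
  induction row with
  | nil => intro s f; simp [pvCollect]
  | cons kv rest ih =>
      intro s f
      simp only [pvCollect, List.foldl_cons]
      by_cases hv : kv.2 = ""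
      · simp only [hv, ne_eq, not_true_eq_false, if_false]
        rw [show (rest.foldl (fun s kv => if kv.2 ≠ "" then PySem.Set.add s kv.1 else s) s)
              = pvCollect s rest from rfl]
        rw [ih s f]
        constructor
        · rintro (h | ⟨p, hp, h1, h2⟩)
          · exact Or.inl h
          · exact Or.inr ⟨p, List.mem_cons_of_mem _ hp, h1, h2⟩
        · rintro (h | ⟨p, hp, h1, h2⟩)
          · exact Or.inl h
          · rcases List.mem_cons.mp hp with rfl | hp'
            · exact absurd hv h2
            · exact Or.inr ⟨p, hp', h1, h2⟩
      · simp only [hv, ne_eq, not_false_eq_true, if_true]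
        rw [show (rest.foldl (fun s kv => if kv.2 ≠ "" then PySem.Set.add s kv.1 else s)
              (PySem.Set.add s kv.1)) = pvCollect (PySem.Set.add s kv.1) rest from rfl]
        rw [ih _ f, PySem.Set.mem_add]
        constructor
        · rintro ((h | rfl) | ⟨p, hp, h1, h2⟩)
          · exact Or.inl h
          · exact Or.inr ⟨kv, List.mem_cons_self .., rfl, hv⟩
          · exact Or.inr ⟨p, List.mem_cons_of_mem _ hp, h1, h2⟩
        · rintro (h | ⟨p, hp, h1, h2⟩)
          · exact Or.inl (Or.inl h)
          · rcases List.mem_cons.mp hp with rfl | hp'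
            · exact Or.inl (Or.inr h1.symm)
            · exact Or.inr ⟨p, hp', h1, h2⟩

-- the full fold over rows
theorem pvFold_mem (rows : List (List (String × String))) :
    ∀ s : PySem.Set String, ∀ f : String,
      f ∈ rows.foldl pvCollect s ↔
        f ∈ s ∨ ∃ row ∈ rows, ∃ kv ∈ row, kv.1 = f ∧ kv.2 ≠ "" := by
  induction rows with
  | nil => intro s f; simp
  | cons r rs ih =>
      intro s f
      rw [List.foldl_cons, ih, pvCollect_mem]
      constructor
      · rintro ((h | h) | ⟨row, hrow, hkv⟩)
        · exact Or.inl h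
        · exact Or.inr ⟨r, List.mem_cons_self .., h⟩
        · exact Or.inr ⟨row, List.mem_cons_of_mem _ hrow, hkv⟩
      · rintro (h | ⟨row, hrow, hkv⟩)
        · exact Or.inl (Or.inl h)
        · rcases List.mem_cons.mp hrow with rfl | hr'
          · exact Or.inl (Or.inr hkv)
          · exact Or.inr ⟨row, hr', hkv⟩

-- first-match lookup on a duplicate-free row agrees with 'some item has this key and a truthy value'
theorem pvRowGet_truthy (row : List (String × String)) (f : String)
    (hnd : (row.map Prod.fst).Nodup) :
    pvTruthy (pvRowGet row f) = true ↔ ∃ kv ∈ row, kv.1 = f ∧ kv.2 ≠ "" := by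
  induction row with
  | nil => simp [pvRowGet, pvTruthy, PySem.Dict.get?]
  | cons kv rest ih =>
      simp only [List.map_cons, List.nodup_cons, List.mem_map] at hnd
      rw [show pvRowGet (kv :: rest) f
            = if kv.1 == f then some kv.2 else pvRowGet rest f from
          PySem.Dict.get?_mk_cons ..]
      by_cases hk : kv.1 = f
      · subst hk
        simp only [beq_self_eq_true, if_true, pvTruthy]
        constructor
        · intro h
          exact ⟨kv, List.mem_cons_self .., rfl, by simpa using h⟩
        · rintro ⟨p, hp, h1, h2⟩
          rcases List.mem_cons.mp hp with rfl | hp'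
          · simpa using h2
          · exact absurd ⟨p, hp', h1⟩ hnd.1
      · have hb : (kv.1 == f) = false := by simp [hk]
        rw [hb, if_neg (by simp)]
        rw [ih hnd.2]
        constructor
        · rintro ⟨p, hp, h1, h2⟩
          exact ⟨p, List.mem_cons_of_mem _ hp, h1, h2⟩
        · rintro ⟨p, hp, h1, h2⟩
          rcases List.mem_cons.mp hp with rfl | hp'
          · exact absurd h1 hk
          · exact ⟨p, hp', h1, h2⟩

-- ===== VERDICT (by name: the statement is the Claim_ definition above) =====
theorem field_availability_spec : Claim_equal_field_availability := by
  intro rows _ hpre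
  show field_availability rows = field_availability_alt rows
  unfold field_availability field_availability_alt
  apply List.map_congr_left
  intro f _
  rw [Prod.mk.injEq]
  refine ⟨rfl, ?_⟩
  rw [Bool.eq_iff_iff, List.any_eq_true, PySem.Set.contains_iff, pvFold_mem]
  simp only [PySem.Set.empty, List.not_mem_nil, false_or]
  constructor
  · rintro ⟨row, hr, h⟩
    exact ⟨row, hr, (pvRowGet_truthy row f (hpre row hr)).mp h⟩
  · rintro ⟨row, hr, h⟩
    exact ⟨row, hr, (pvRowGet_truthy row f (hpre row hr)).mpr h⟩
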